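-- pv_equiv track=rewrite | github.com/Wizmann/ACM-ICPC | Leetcode/Algorithm/python/3000/02272-Substring With Largest Variance.py | solve
-- ===== SOURCE A (Python) =====
-- def solve(s, c1, c2):
--     tot = 0
--     res = 0
--     u1, u2 = 0, 0
--     for c in s:
--         if c not in [c1, c2]:
--             continue
--
--         if c == c1:
--             u1 += 1
--         elif c == c2:
--             u2 += 1
--
--         u = 1 if c == c1 else -1
--         tot += u
--
--         if u1 and u2:
--             res = max(res, tot)
--         elif u1:
--             res = max(res, tot - 1)
--
--         if tot < 0:
--             tot = 0
--             u1, u2 = 0, 0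
--
--     return res
-- ===== SOURCE B (Python) =====
-- def solve(s, c1, c2):
--     # Staged prefix-sum formulation: instead of a reset-based scan, compute
--     # prefix sums, their running minima (= reset points), and the last position
--     # of a negative delta, then read the answer off per position.
--     deltas = [1 if c == c1 else -1 for c in s if c == c1 or c == c2]
--     # prefix sums pre[j], j = 1..n
--     pre = []
--     p = 0
--     for d in deltas:
--         p += d
--         pre.append(p)
--     # running minimum of (0, pre[1..j]) and position of the last strict new minimum
--     minresets = []
--     m, r, j = 0, 0, 1
--     for p in pre:
--         if p < m:
--             m, r = p, j
--         minresets.append((m, r))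
--         j += 1
--     # last position (1-based) carrying a -1 delta, 0 if none yet
--     lastneg = []
--     ln, j = 0, 1
--     for d in deltas:
--         if d == -1:
--             ln = j
--         lastneg.append(ln)
--         j += 1
--     # combine: position j contributes pre[j]-min if a -1 lies after the last
--     # strict minimum, pre[j]-min-1 if only +1s do, nothing if the window is empty
--     best, j = 0, 1
--     for p, (m, r), ln in zip(pre, minresets, lastneg):
--         if r < j:
--             v = p - m
--             best = max(best, v if r < ln else v - 1)
--         j += 1
--     return best
-- ===== Notes on version B (the rewrite author's own statement) =====
-- stated objective: alternative
-- what changed: B replaces A's single-pass Kadane scan (running total with reset-on-negative and truthiness flags) by a staged prefix-sum formulation: it builds the delta list, its prefix sums, the running minima with the position of the last strict new minimum, and the last negative-delta position, then reads each position's contribution off these arrays with no reset logic.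
import Mathlib
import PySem

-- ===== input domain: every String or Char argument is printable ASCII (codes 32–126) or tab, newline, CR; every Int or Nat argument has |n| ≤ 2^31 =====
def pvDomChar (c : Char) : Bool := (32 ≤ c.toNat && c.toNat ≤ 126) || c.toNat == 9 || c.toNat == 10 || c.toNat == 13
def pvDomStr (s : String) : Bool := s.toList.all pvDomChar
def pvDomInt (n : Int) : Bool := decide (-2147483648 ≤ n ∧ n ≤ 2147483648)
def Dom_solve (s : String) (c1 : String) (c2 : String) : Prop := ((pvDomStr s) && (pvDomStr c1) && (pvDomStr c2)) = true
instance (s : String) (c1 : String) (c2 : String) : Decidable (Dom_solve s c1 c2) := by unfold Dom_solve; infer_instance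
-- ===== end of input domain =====

-- B replaces A's reset-based Kadane scan by a staged prefix-sum formulation (prefix sums,
-- running minima / reset positions, last negative-delta position) — same O(n) cost.


-- ===== PORT A =====
-- state = (tot, res, u1, u2); one step per character of s, exactly A's branch order
def solveStep (c1 c2 : String) (st : Int × Int × Int × Int) (c : Char) : Int × Int × Int × Int :=
  let cs := String.ofList [c]
  if ¬(cs = c1 ∨ cs = c2) then st
  else
    let u1 := if cs = c1 then st.2.2.1 + 1 else st.2.2.1
    let u2 := if cs = c1 then st.2.2.2 else (if cs = c2 then st.2.2.2 + 1 else st.2.2.2)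
    let u : Int := if cs = c1 then 1 else -1
    let tot := st.1 + u
    let res := if u1 ≠ 0 ∧ u2 ≠ 0 then max st.2.1 tot
               else if u1 ≠ 0 then max st.2.1 (tot - 1) else st.2.1
    if tot < 0 then (0, res, 0, 0) else (tot, res, u1, u2)

def solve (s : String) (c1 : String) (c2 : String) : Int :=
  (s.toList.foldl (solveStep c1 c2) (0, 0, 0, 0)).2.1

-- ===== PORT B =====
-- stage 1: the signed delta list for the pair
def solveDeltas (c1 c2 : String) (s : String) : List Int :=
  (s.toList.filter (fun c => String.ofList [c] = c1 ∨ String.ofList [c] = c2)).map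
    (fun c => if String.ofList [c] = c1 then (1 : Int) else -1)

-- stage 2: prefix sums pre[j], j = 1..n
def preOf (p : Int) (ds : List Int) : List Int :=
  match ds with
  | [] => []
  | d :: ds => (p + d) :: preOf (p + d) ds

-- stage 3: running minimum of (0, pre[1..j]) with the position of the last strict new minimum
def minsResetsOf (m r j : Int) (ps : List Int) : List (Int × Int) :=
  match ps with
  | [] => []
  | p :: ps =>
    if p < m then (p, j) :: minsResetsOf p j (j + 1) ps
    else (m, r) :: minsResetsOf m r (j + 1) ps

-- stage 4: last position (1-based) holding a -1 delta, 0 if none yet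
def lastnegOf (ln j : Int) (ds : List Int) : List Int :=
  match ds with
  | [] => []
  | d :: ds =>
    (if d = -1 then j else ln) :: lastnegOf (if d = -1 then j else ln) (j + 1) ds

-- stage 5: combine the three arrays positionwise
def bestLoop (best j : Int) (rows : List (Int × (Int × Int) × Int)) : Int :=
  match rows with
  | [] => best
  | (p, (m, r), ln) :: rows =>
    let best' := if r < j then max best (if r < ln then p - m else p - m - 1) else best
    bestLoop best' (j + 1) rows

def solve_alt (s : String) (c1 : String) (c2 : String) : Int :=
  let ds := solveDeltas c1 c2 s
  let pre := preOf 0 ds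
  let mr := minsResetsOf 0 0 1 pre
  let ln := lastnegOf 0 1 ds
  bestLoop 0 1 (pre.zip (mr.zip ln))

-- ===== PRECONDITION & SPEC =====
def Spec_solve (s : String) (c1 : String) (c2 : String) (out : Int) : Prop := out = solve_alt s c1 c2
instance (s : String) (c1 : String) (c2 : String) (out : Int) : Decidable (Spec_solve s c1 c2 out) := by unfold Spec_solve; infer_instance

-- ===== CLAIM (what is proved, stated in full; the proofs are below) =====
def Claim_equal_solve : Prop := ∀ (s : String) (c1 : String) (c2 : String), Dom_solve s c1 c2 → Spec_solve s c1 c2 (solve s c1 c2)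

-- ===== LEMMAS AND PROOFS =====

-- A's step expressed on the delta value instead of the character
def stepD (st : Int × Int × Int × Int) (d : Int) : Int × Int × Int × Int :=
  let u1 := if d = 1 then st.2.2.1 + 1 else st.2.2.1
  let u2 := if d = 1 then st.2.2.2 else st.2.2.2 + 1
  let tot := st.1 + d
  let res := if u1 ≠ 0 ∧ u2 ≠ 0 then max st.2.1 tot
             else if u1 ≠ 0 then max st.2.1 (tot - 1) else st.2.1
  if tot < 0 then (0, res, 0, 0) else (tot, res, u1, u2)

-- A's char fold equals the delta fold over solveDeltas
theorem foldA_deltas (c1 c2 : String) (l : List Char) : ∀ (st : Int × Int × Int × Int),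
    l.foldl (solveStep c1 c2) st =
    ((l.filter (fun c => String.ofList [c] = c1 ∨ String.ofList [c] = c2)).map
      (fun c => if String.ofList [c] = c1 then (1 : Int) else -1)).foldl stepD st := by
  induction l with
  | nil => intro st; simp
  | cons c l ih =>
    intro st
    by_cases h1 : String.ofList [c] = c1
    · have hrel : (String.ofList [c] = c1 ∨ String.ofList [c] = c2) := Or.inl h1
      simp only [List.foldl_cons, List.filter_cons, List.map_cons, hrel, decide_true, if_true,
        if_pos h1]
      rw [ih]
      congr 1
      rw [solveStep, stepD]
      simp only [if_neg (not_not_intro hrel), if_pos h1, if_true]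
    · by_cases h2 : String.ofList [c] = c2
      · have hrel : (String.ofList [c] = c1 ∨ String.ofList [c] = c2) := Or.inr h2
        simp only [List.foldl_cons, List.filter_cons, List.map_cons, hrel, decide_true, if_true,
          if_neg h1]
        rw [ih]
        congr 1
        rw [solveStep, stepD]
        simp only [if_neg (not_not_intro hrel), if_neg h1, if_pos h2,
          show ((-1 : Int) = 1) = False from by simp, if_false]
      · have hrel : ¬ (String.ofList [c] = c1 ∨ String.ofList [c] = c2) := by tauto
        simp only [List.foldl_cons, List.filter_cons, solveStep, hrel, decide_false,
          Bool.false_eq_true, if_false, not_false_iff, if_true]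
        exact ih st

-- main invariant linking A's scan state to B's staged arrays
theorem solve_key (ds : List Int) : ∀ (p m r j ln res u1 u2 : Int),
    (∀ d ∈ ds, d = 1 ∨ d = -1) →
    0 ≤ res → 0 ≤ p - m → r ≤ j → ln ≤ j →
    (0 < u1 ↔ r < j) → (0 < u2 ↔ r < ln) → (r = j → p = m) →
    0 ≤ u1 → 0 ≤ u2 →
    (ds.foldl stepD (p - m, res, u1, u2)).2.1 =
    bestLoop res (j + 1) ((preOf p ds).zip ((minsResetsOf m r (j + 1) (preOf p ds)).zip
      (lastnegOf ln (j + 1) ds))) := by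
  induction ds with
  | nil => intro p m r j ln res u1 u2 _ _ _ _ _ _ _ _ _ _; simp [bestLoop, preOf]
  | cons d ds ih =>
    intro p m r j ln res u1 u2 hall hres htot hrj hlnj hu1 hu2 hrm hu1n hu2n
    have hd := hall d (by simp)
    have hall' : ∀ d ∈ ds, d = 1 ∨ d = -1 := fun x hx => hall x (by simp [hx])
    rcases hd with hd | hd
    · -- d = 1: no reset, u1 grows
      subst hd
      simp only [preOf, List.foldl_cons, stepD, if_true]
      have hne : ¬ (p - m + 1 < 0) := by omega
      have hmin : ¬ (p + 1 < m) := by omega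
      rw [if_neg hne]
      simp only [minsResetsOf, if_neg hmin, lastnegOf, if_neg (show ¬ (1 : Int) = -1 by omega),
        List.zip_cons_cons, bestLoop]
      rw [if_pos (show r < j + 1 by omega)]
      have hres' : ∀ x : Int, res ≤ max res x := fun x => le_max_left _ _
      by_cases h2 : 0 < u2
      · have hb : (u1 + 1 ≠ 0 ∧ u2 ≠ 0) := by omega
        rw [if_pos hb, if_pos (hu2.mp h2)]
        have e : p - m + 1 = p + 1 - m := by ring
        rw [e]
        exact ih (p + 1) m r (j + 1) ln _ (u1 + 1) u2 hall'
          (le_trans hres (hres' _)) (by omega) (by omega) (by omega)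
          (by constructor <;> omega) (by constructor <;> intro h <;> omega)
          (by omega) (by omega) (by omega)
      · have hb : ¬ (u1 + 1 ≠ 0 ∧ u2 ≠ 0) := by omega
        have hln : ¬ (r < ln) := fun h => h2 (hu2.mpr h)
        rw [if_neg hb, if_pos (show u1 + 1 ≠ 0 by omega), if_neg hln]
        have e : p - m + 1 - 1 = p + 1 - m - 1 := by ring
        rw [e]
        have e2 : p - m + 1 = p + 1 - m := by ring
        rw [e2]
        exact ih (p + 1) m r (j + 1) ln _ (u1 + 1) u2 hall'
          (le_trans hres (hres' _)) (by omega) (by omega) (by omega)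
          (by constructor <;> omega) hu2 (by omega) (by omega) (by omega)
    · -- d = -1
      subst hd
      simp only [preOf, List.foldl_cons, stepD, lastnegOf,
        show ((-1 : Int) = 1) = False from by simp, if_true, if_false]
      by_cases hz : p = m
      · -- reset step: tot becomes -1, both sides contribute nothing
        have hne : p - m + -1 < 0 := by omega
        have hmin : p + -1 < m := by omega
        rw [if_pos hne]
        simp only [minsResetsOf, if_pos hmin, List.zip_cons_cons, bestLoop]
        rw [if_neg (show ¬ (j + 1 < j + 1) by omega)]
        have hresv : (if u1 ≠ 0 ∧ u2 + 1 ≠ 0 then max res (p - m + -1)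
            else if u1 ≠ 0 then max res (p - m + -1 - 1) else res) = res := by
          split_ifs <;> omega
        rw [hresv]
        have h := ih (p + -1) (p + -1) (j + 1) (j + 1) (j + 1) res 0 0 hall'
          hres (by omega) (by omega) (by omega)
          (by constructor <;> intro h <;> omega) (by constructor <;> intro h <;> omega)
          (fun _ => rfl) (by omega) (by omega)
        rw [show p + -1 - (p + -1) = (0 : Int) by ring] at h
        exact h
      · -- tot > 0: no reset, u2 grows
        have hrlt : r < j := by omega
        have h1 : 0 < u1 := hu1.mpr hrlt
        have hne : ¬ (p - m + -1 < 0) := by omega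
        have hmin : ¬ (p + -1 < m) := by omega
        rw [if_neg hne]
        simp only [minsResetsOf, if_neg hmin, List.zip_cons_cons, bestLoop]
        rw [if_pos (show r < j + 1 by omega), if_pos (show r < j + 1 by omega)]
        have hb : (u1 ≠ 0 ∧ u2 + 1 ≠ 0) := by omega
        rw [if_pos hb]
        have e : p - m + -1 = p + -1 - m := by ring
        rw [e]
        exact ih (p + -1) m r (j + 1) (j + 1) _ u1 (u2 + 1) hall'
          (le_trans hres (le_max_left _ _)) (by omega) (by omega) (by omega)
          (by constructor <;> omega) (by constructor <;> omega)
          (by omega) (by omega) (by omega)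

-- ===== VERDICT (by name: the statement is the Claim_ definition above) =====
theorem solve_spec : Claim_equal_solve := by
  intro s c1 c2 _
  unfold Spec_solve solve solve_alt
  rw [foldA_deltas]
  have hall : ∀ d ∈ solveDeltas c1 c2 s, d = 1 ∨ d = -1 := by
    intro d hd
    simp only [solveDeltas, List.mem_map] at hd
    obtain ⟨c, _, hc⟩ := hd
    by_cases h : String.ofList [c] = c1 <;> simp [h] at hc <;> omega
  have h := solve_key (solveDeltas c1 c2 s) 0 0 0 0 0 0 0 0 hall le_rfl (by omega) le_rfl le_rfl
    (by omega) (by omega) (fun _ => rfl) le_rfl le_rfl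
  simpa [solveDeltas] using h
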